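-- pv_equiv track=rewrite | github.com/baolam/TensorTonic-Solutions | random-forest-vote/random-forest-vote.py | random_forest_vote
-- ===== SOURCE A (Python) =====
-- from collections import defaultdict
--
-- def random_forest_vote(predictions):
--     """
--     Compute the majority vote from multiple tree predictions.
--     """
--     # Write code here
--     answer = []
--
--     m, n = len(predictions), len(predictions[0])
--     for j in range(n):
--         votes = defaultdict(int)
--
--         for i in range(m):
--             votes[predictions[i][j]] += 1
--
--         label = max(votes.items(), key = lambda x : (x[1], -x[0]))[0]
--         answer.append(label)
--
--     return answer
-- ===== SOURCE B (Python) =====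
-- def random_forest_vote(predictions):
--     """
--     Compute the majority vote from multiple tree predictions.
--
--     Per column: sort the column and scan runs of equal values, keeping the
--     value with the strictly longest run (so the smallest label wins ties).
--     """
--     answer = []
--     for j in range(len(predictions[0])):
--         col = sorted(row[j] for row in predictions)
--         best = col[0]
--         best_run = 0
--         cur = col[0]
--         run = 0
--         for v in col:
--             if v == cur:
--                 run += 1
--             else:
--                 cur = v
--                 run = 1
--             if run > best_run:
--                 best_run = run
--                 best = v
--         answer.append(best)
--     return answer
-- ===== Notes on version B (the rewrite author's own statement) =====
-- stated objective: alternative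
-- what changed: Replaces the per-column defaultdict counting plus a single max over (count, -label) tuples by sorting each column and scanning runs of equal values, keeping the value whose run is strictly longest (smallest label wins ties).
import Mathlib
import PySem

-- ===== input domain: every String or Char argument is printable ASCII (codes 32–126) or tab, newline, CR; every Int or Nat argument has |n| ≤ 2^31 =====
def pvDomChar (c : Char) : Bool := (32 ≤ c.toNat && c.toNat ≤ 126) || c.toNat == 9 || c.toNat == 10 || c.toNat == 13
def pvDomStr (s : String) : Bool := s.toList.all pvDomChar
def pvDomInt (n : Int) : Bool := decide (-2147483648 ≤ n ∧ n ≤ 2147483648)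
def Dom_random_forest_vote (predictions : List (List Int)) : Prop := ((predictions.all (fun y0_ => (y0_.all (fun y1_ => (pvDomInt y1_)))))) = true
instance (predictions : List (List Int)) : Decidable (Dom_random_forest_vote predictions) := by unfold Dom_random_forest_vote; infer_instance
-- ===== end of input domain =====

-- B replaces A's per-column dict counting + tuple-keyed max by sorting each column and scanning runs of equal values (longest run wins, smallest label on ties); objective: alternative.

-- ===== PORT A =====
def random_forest_vote (predictions : List (List Int)) : List Int :=
  let m : Int := predictions.length
  let n : Int := (PySem.List.pyGetD predictions 0 []).length
  (PySem.List.pyRange 0 n 1).foldl (fun answer j =>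
    let votes : PySem.Dict Int Int :=
      (PySem.List.pyRange 0 m 1).foldl (fun d i =>
        d.modify (PySem.List.pyGetD (PySem.List.pyGetD predictions i []) j 0) 0 (· + 1))
        PySem.Dict.empty
    let label := ((PySem.List.max2? votes.items (fun x => x.2) (fun x => -x.1)).getD (0, 0)).1
    answer ++ [label]) []

-- ===== PORT B =====
def random_forest_vote_alt (predictions : List (List Int)) : List Int :=
  (PySem.List.pyRange 0 ((PySem.List.pyGetD predictions 0 []).length : Int) 1).foldl (fun answer j =>
    let col := PySem.List.sorted (predictions.map (fun row => PySem.List.pyGetD row j 0)) (fun x => x) false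
    let c0 := PySem.List.pyGetD col 0 0
    let st := col.foldl (fun (s : Int × Int × Int × Int) v =>
        let best := s.1; let bestRun := s.2.1; let cur := s.2.2.1; let run := s.2.2.2
        let cur' := if v == cur then cur else v
        let run' := if v == cur then run + 1 else 1
        if run' > bestRun then (v, run', cur', run') else (best, bestRun, cur', run'))
      (c0, 0, c0, 0)
    answer ++ [st.1]) []

-- ===== PRECONDITION & SPEC =====
-- Pre_ excludes exactly the inputs where Python A raises IndexError: empty predictions
-- (predictions[0]) and rows shorter than the first row (predictions[i][j]).
def Pre_random_forest_vote (predictions : List (List Int)) : Prop :=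
  predictions ≠ [] ∧ ∀ row ∈ predictions, (predictions.headD []).length ≤ row.length
instance (predictions : List (List Int)) : Decidable (Pre_random_forest_vote predictions) := by unfold Pre_random_forest_vote; infer_instance
def pvWitness_random_forest_vote : List (List Int) := [[1, 2], [1, 3], [2, 3]]
def Spec_random_forest_vote (predictions : List (List Int)) (out : List Int) : Prop := out = random_forest_vote_alt predictions
instance (predictions : List (List Int)) (out : List Int) : Decidable (Spec_random_forest_vote predictions out) := by unfold Spec_random_forest_vote; infer_instance

-- ===== CLAIM (what is proved, stated in full; the proofs are below) =====
def Claim_equal_random_forest_vote : Prop := ∀ (predictions : List (List Int)), Dom_random_forest_vote predictions → Pre_random_forest_vote predictions → Spec_random_forest_vote predictions (random_forest_vote predictions)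

-- ===== LEMMAS AND PROOFS =====

-- lexicographic "y ≤ mx" relation used by A's max key
def relLex (k1 k2 : Int) (l1 l2 : Int) : Prop := k1 < l1 ∨ (k1 = l1 ∧ k2 ≤ l2)

def mstep {α : Type} (k1 k2 : α → Int) (m x : α) : α :=
  if (decide (k1 m < k1 x) || !decide (k1 x < k1 m) && decide (k2 m < k2 x)) = true then x else m

theorem mstep_mem {α : Type} (k1 k2 : α → Int) (m x : α) : mstep k1 k2 m x = m ∨ mstep k1 k2 m x = x := by
  unfold mstep; split_ifs <;> simp

theorem rel_mstep_left {α : Type} (k1 k2 : α → Int) (m x : α) :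
    relLex (k1 m) (k2 m) (k1 (mstep k1 k2 m x)) (k2 (mstep k1 k2 m x)) := by
  unfold mstep relLex; split_ifs with h
  · simp only [Bool.or_eq_true, Bool.and_eq_true, Bool.not_eq_true', decide_eq_true_eq, decide_eq_false_iff_not] at h
    omega
  · omega

theorem rel_mstep_right {α : Type} (k1 k2 : α → Int) (m x : α) :
    relLex (k1 x) (k2 x) (k1 (mstep k1 k2 m x)) (k2 (mstep k1 k2 m x)) := by
  unfold mstep relLex; split_ifs with h
  · omega
  · simp only [Bool.or_eq_true, Bool.and_eq_true, Bool.not_eq_true', decide_eq_true_eq, decide_eq_false_iff_not, not_or, not_and] at h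
    omega

theorem rel_trans {a1 a2 b1 b2 c1 c2 : Int} (h1 : relLex a1 a2 b1 b2) (h2 : relLex b1 b2 c1 c2) :
    relLex a1 a2 c1 c2 := by unfold relLex at *; omega

theorem foldl_mstep_mem {α : Type} (k1 k2 : α → Int) (l : List α) : ∀ m, l.foldl (mstep k1 k2) m ∈ m :: l := by
  induction l with
  | nil => simp
  | cons x t ih =>
    intro m
    have h := ih (mstep k1 k2 m x)
    simp only [List.foldl_cons, List.mem_cons] at h ⊢
    rcases mstep_mem k1 k2 m x with e | e <;> rw [e] at h ⊢ <;> tauto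

theorem foldl_mstep_isMax {α : Type} (k1 k2 : α → Int) (l : List α) :
    ∀ m, ∀ y ∈ m :: l, relLex (k1 y) (k2 y) (k1 (l.foldl (mstep k1 k2) m)) (k2 (l.foldl (mstep k1 k2) m)) := by
  induction l with
  | nil => intro m y hy; simp at hy; subst hy; exact Or.inr ⟨rfl, le_refl _⟩
  | cons x t ih =>
    intro m y hy
    simp only [List.mem_cons] at hy
    simp only [List.foldl_cons]
    rcases hy with rfl | rfl | hy
    · exact rel_trans (rel_mstep_left k1 k2 y x) (ih _ _ (List.mem_cons_self ..))
    · exact rel_trans (rel_mstep_right k1 k2 m y) (ih _ _ (List.mem_cons_self ..))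
    · exact ih _ _ (List.mem_cons_of_mem _ hy)

theorem max2?_spec {α : Type} (k1 k2 : α → Int) (x : α) (t : List α) :
    ∃ mx, PySem.List.max2? (x :: t) k1 k2 = some mx ∧ mx ∈ x :: t ∧
      ∀ y ∈ x :: t, relLex (k1 y) (k2 y) (k1 mx) (k2 mx) := by
  have hfold : ∀ (l : List α) (m : α),
      l.foldl (fun acc x => match acc with
        | none => some x
        | some m => if (decide (k1 m < k1 x) || !decide (k1 x < k1 m) && decide (k2 m < k2 x)) = true then some x else some m)
        (some m) = some (l.foldl (mstep k1 k2) m) := by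
    intro l
    induction l with
    | nil => intro m; rfl
    | cons a t ih =>
      intro m
      simp only [List.foldl_cons]
      rw [← apply_ite some]
      exact ih (mstep k1 k2 m a)
  refine ⟨t.foldl (mstep k1 k2) x, ?_, foldl_mstep_mem k1 k2 t x, foldl_mstep_isMax k1 k2 t x⟩
  show List.foldl _ none (x :: t) = _
  simp only [List.foldl_cons]
  exact hfold t x

def IsBest (col : List Int) (L : Int) : Prop :=
  L ∈ col ∧ (∀ w ∈ col, col.count w ≤ col.count L) ∧ (∀ w ∈ col, col.count w = col.count L → L ≤ w)

def voteStep (s : Int × Int × Int × Int) (v : Int) : Int × Int × Int × Int :=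
  let best := s.1; let bestRun := s.2.1; let cur := s.2.2.1; let run := s.2.2.2
  let cur' := if v == cur then cur else v
  let run' := if v == cur then run + 1 else 1
  if run' > bestRun then (v, run', cur', run') else (best, bestRun, cur', run')

theorem count_append_singleton (p : List Int) (v w : Int) :
    (p ++ [v]).count w = p.count w + if w = v then 1 else 0 := by
  rw [List.count_append]
  congr 1
  simp only [List.count_cons, List.count_nil, beq_iff_eq, Nat.zero_add]
  by_cases h : w = v
  · simp [h]
  · simp [h, Ne.symm h]

theorem mem_append_singleton {p : List Int} {v w : Int} (hw : w ∈ p ++ [v]) (hwv : w ≠ v) : w ∈ p := by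
  simp only [List.mem_append, List.mem_singleton] at hw; tauto

theorem voteScan_aux (rest : List Int) : ∀ (p : List Int) (best cur : Int),
    p ≠ [] →
    (p ++ rest).Pairwise (· ≤ ·) →
    cur ∈ p → (∀ w ∈ p, w ≤ cur) →
    best ∈ p →
    (∀ w ∈ p, p.count w ≤ p.count best) →
    (∀ w ∈ p, p.count w = p.count best → best ≤ w) →
    IsBest (p ++ rest)
      ((rest.foldl voteStep (best, (p.count best : Int), cur, (p.count cur : Int))).1) := by
  induction rest with
  | nil =>
    intro p best cur _ _ _ _ hb hmax hmin
    simpa [IsBest] using ⟨hb, hmax, hmin⟩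
  | cons v rest ih =>
    intro p best cur hp hsort hcur hcmax hb hmax hmin
    have hassoc : p ++ v :: rest = (p ++ [v]) ++ rest := by simp
    rw [hassoc] at hsort ⊢
    have hple : ∀ w ∈ p, w ≤ v := by
      intro w hw
      have := (List.pairwise_append.mp (by rwa [← hassoc] at hsort)).2.2
      exact this w hw v (List.mem_cons_self ..)
    have hbest_pos : 1 ≤ p.count best := List.count_pos_iff.mpr hb
    have hvmem : ∀ w ∈ p ++ [v], w ≤ v := by
      intro w hw
      by_cases hwv : w = v
      · exact le_of_eq hwv
      · exact hple w (mem_append_singleton hw hwv)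
    simp only [List.foldl_cons]
    by_cases hv : v = cur
    · -- the run of cur continues
      subst hv
      have hcv : (p ++ [v]).count v = p.count v + 1 := by
        rw [count_append_singleton, if_pos rfl]
      have hstep : voteStep (best, (p.count best : Int), v, (p.count v : Int)) v
          = if ((p.count v : Int) + 1 > (p.count best : Int))
            then (v, (p.count v : Int) + 1, v, (p.count v : Int) + 1)
            else (best, (p.count best : Int), v, (p.count v : Int) + 1) := by
        simp [voteStep]
      rw [hstep]
      by_cases hgt : (p.count v : Int) + 1 > (p.count best : Int)
      · rw [if_pos hgt]
        have := ih (p ++ [v]) v v (by simp) hsort (by simp) hvmem (by simp) ?_ ?_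
        · rw [hcv] at this; push_cast at this ⊢; exact this
        · intro w hw
          by_cases hwv : w = v
          · subst hwv; omega
          · have hwp : w ∈ p := mem_append_singleton hw hwv
            rw [hcv, count_append_singleton, if_neg hwv]
            have := hmax w hwp; omega
        · intro w hw hc
          by_cases hwv : w = v
          · omega
          · have hwp : w ∈ p := mem_append_singleton hw hwv
            rw [hcv, count_append_singleton, if_neg hwv] at hc
            have := hmax w hwp; omega
      · rw [if_neg hgt]
        have hbv : best ≠ v := by
          intro h; rw [← h] at hgt; omega
        have hcb : (p ++ [v]).count best = p.count best := by
          rw [count_append_singleton, if_neg hbv]; omega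
        have := ih (p ++ [v]) best v (by simp) hsort (by simp) hvmem (by simp [hb]) ?_ ?_
        · rw [hcb, hcv] at this; push_cast at this ⊢; exact this
        · intro w hw
          rw [hcb]
          by_cases hwv : w = v
          · subst hwv; rw [hcv]; omega
          · have hwp : w ∈ p := mem_append_singleton hw hwv
            rw [count_append_singleton, if_neg hwv]
            exact hmax w hwp
        · intro w hw hc
          rw [hcb] at hc
          by_cases hwv : w = v
          · subst hwv; exact hple best hb
          · have hwp : w ∈ p := mem_append_singleton hw hwv
            rw [count_append_singleton, if_neg hwv] at hc
            exact hmin w hwp hc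
    · -- a new, strictly larger value v starts a run of length 1
      have hvp : v ∉ p := by
        intro hvp
        exact hv (le_antisymm (hcmax v hvp) (hple cur hcur))
      have hcnt0 : p.count v = 0 := List.count_eq_zero.mpr hvp
      have hbv : best ≠ v := by intro h; exact hvp (h ▸ hb)
      have hcb : (p ++ [v]).count best = p.count best := by
        rw [count_append_singleton, if_neg hbv]; omega
      have hcv : (p ++ [v]).count v = 1 := by
        rw [count_append_singleton, if_pos rfl, hcnt0]
      have hstep : voteStep (best, (p.count best : Int), cur, (p.count cur : Int)) v
          = (best, (p.count best : Int), v, 1) := by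
        have hf : (v == cur) = false := by simp [hv]
        simp only [voteStep, hf, if_false, Bool.false_eq_true]
        rw [if_neg (by omega)]
      rw [hstep]
      have := ih (p ++ [v]) best v (by simp) hsort (by simp) hvmem (by simp [hb]) ?_ ?_
      · rw [hcb, hcv] at this; push_cast at this ⊢; exact this
      · intro w hw
        rw [hcb]
        by_cases hwv : w = v
        · subst hwv; rw [hcv]; omega
        · have hwp : w ∈ p := mem_append_singleton hw hwv
          rw [count_append_singleton, if_neg hwv]
          exact hmax w hwp
      · intro w hw hc
        rw [hcb] at hc
        by_cases hwv : w = v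
        · subst hwv; exact hple best hb
        · have hwp : w ∈ p := mem_append_singleton hw hwv
          rw [count_append_singleton, if_neg hwv] at hc
          exact hmin w hwp hc

theorem b_side (c : Int) (t : List Int) (hs : (c :: t).Pairwise (· ≤ ·)) :
    IsBest (c :: t) (((c :: t).foldl voteStep (c, 0, c, 0)).1) := by
  have hstep1 : voteStep (c, 0, c, 0) c = (c, 1, c, 1) := by simp [voteStep]
  have h1 : (([c] : List Int).count c : Int) = 1 := by simp
  have := voteScan_aux t [c] c c (by simp) (by simpa using hs) (by simp) (by simp) (by simp)
    (by simp) (by simp)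
  simp only [List.foldl_cons, hstep1]
  simpa [h1] using this

theorem a_side (col : List Int) (h : col ≠ []) :
    IsBest col (((PySem.List.max2? ((PySem.Dict.counter col).items)
        (fun x => x.2) (fun x => -x.1)).getD (0, 0)).1) := by
  have hitems : (PySem.Dict.counter col).items
      = (PySem.Set.ofList col).map (fun k => (k, (col.count k : Int))) :=
    PySem.Dict.items_counter col
  obtain ⟨c, t, rfl⟩ : ∃ c t, col = c :: t := by
    cases col with
    | nil => exact absurd rfl h
    | cons c t => exact ⟨c, t, rfl⟩
  obtain ⟨s, ss, hS⟩ : ∃ s ss, PySem.Set.ofList (c :: t) = s :: ss := by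
    cases hS : PySem.Set.ofList (c :: t) with
    | nil =>
      have : c ∈ PySem.Set.ofList (c :: t) :=
        (PySem.Set.mem_ofList _ _).mpr (List.mem_cons_self ..)
      rw [hS] at this; simp at this
    | cons s ss => exact ⟨s, ss, rfl⟩
  rw [hitems, hS]
  simp only [List.map_cons]
  obtain ⟨mx, hmx, hmem, hrel⟩ := max2?_spec (fun x : Int × Int => x.2) (fun x : Int × Int => -x.1)
    (s, ((c :: t).count s : Int)) (ss.map (fun k => (k, ((c :: t).count k : Int))))
  rw [hmx, Option.getD_some]
  have hmem' : mx ∈ (s :: ss).map (fun k => (k, ((c :: t).count k : Int))) := by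
    simpa [List.map_cons] using hmem
  obtain ⟨L, hL, rfl⟩ := List.mem_map.mp hmem'
  show IsBest (c :: t) L
  have hLmem : L ∈ c :: t := (PySem.Set.mem_ofList _ _).mp (hS ▸ hL)
  have hrel' : ∀ w ∈ c :: t,
      relLex ((c :: t).count w : Int) (-w) ((c :: t).count L : Int) (-L) := by
    intro w hw
    have hw' : w ∈ s :: ss := hS ▸ (PySem.Set.mem_ofList _ _).mpr hw
    have hyw : (w, ((c :: t).count w : Int))
        ∈ (s, ((c :: t).count s : Int)) :: ss.map (fun k => (k, ((c :: t).count k : Int))) := by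
      rcases List.mem_cons.mp hw' with rfl | hw''
      · exact List.mem_cons_self ..
      · exact List.mem_cons_of_mem _ (List.mem_map.mpr ⟨w, hw'', rfl⟩)
    have := hrel _ hyw
    simpa using this
  refine ⟨hLmem, ?_, ?_⟩
  · intro w hw
    have := hrel' w hw
    unfold relLex at this
    omega
  · intro w hw hc
    have := hrel' w hw
    unfold relLex at this
    omega

theorem isBest_unique {col : List Int} {L1 L2 : Int} (h1 : IsBest col L1) (h2 : IsBest col L2) : L1 = L2 := by
  obtain ⟨m1, max1, min1⟩ := h1
  obtain ⟨m2, max2, min2⟩ := h2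
  have hc : col.count L1 = col.count L2 := le_antisymm (max2 _ m1) (max1 _ m2)
  have := min1 _ m2 hc.symm
  have := min2 _ m1 hc
  omega

theorem isBest_perm {col col' : List Int} {L : Int} (hp : col.Perm col') (h : IsBest col L) : IsBest col' L := by
  obtain ⟨hm, hmax, hmin⟩ := h
  refine ⟨hp.mem_iff.mp hm, ?_, ?_⟩
  · intro w hw
    rw [← hp.count_eq, ← hp.count_eq]
    exact hmax w (hp.mem_iff.mpr hw)
  · intro w hw hc
    rw [← hp.count_eq, ← hp.count_eq] at hc
    exact hmin w (hp.mem_iff.mpr hw) hc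



theorem main_eq (predictions : List (List Int)) (hne : predictions ≠ []) :
    random_forest_vote predictions = random_forest_vote_alt predictions := by
  unfold random_forest_vote random_forest_vote_alt
  apply PySem.List.foldl_congr_mem
  intro acc j hj
  dsimp only
  congr 1
  congr 1
  -- A's label = B's best, per column j
  set col : List Int := predictions.map (fun row => PySem.List.pyGetD row j 0) with hcol
  have hcne : col ≠ [] := by
    simp [hcol, hne]
  have hA : (PySem.List.pyRange 0 (predictions.length : Int) 1).foldl
      (fun d i => d.modify (PySem.List.pyGetD (PySem.List.pyGetD predictions i []) j 0) 0 (· + 1))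
      PySem.Dict.empty = PySem.Dict.counter col := by
    rw [PySem.List.foldl_pyRange_zero_pyGetD' predictions []
      (fun d row => PySem.Dict.modify d (PySem.List.pyGetD row j 0) 0 (· + 1)) PySem.Dict.empty]
    rw [hcol, ← PySem.Dict.foldl_insert_getD_add_one_eq_counter, List.foldl_map]
    rfl
  rw [hA]
  -- B side
  obtain ⟨c, t, hsc⟩ : ∃ c t, PySem.List.sorted col (fun x => x) false = c :: t := by
    cases hsc : PySem.List.sorted col (fun x => x) false with
    | nil => exact absurd ((PySem.List.sorted_eq_nil_iff _ _ _).mp hsc) hcne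
    | cons c t => exact ⟨c, t, rfl⟩
  rw [hsc, PySem.List.pyGetD_zero_cons]
  have hpair : (c :: t).Pairwise (· ≤ ·) := by
    have := PySem.List.sorted_pairwise col (fun x => x)
    rw [hsc] at this
    simpa using this
  have hBbest : IsBest col (((c :: t).foldl voteStep (c, 0, c, 0)).1) := by
    have hperm : (c :: t).Perm col := hsc ▸ PySem.List.sorted_perm col (fun x => x) false
    exact isBest_perm hperm (b_side c t hpair)
  exact isBest_unique (a_side col hcne) hBbest

-- ===== VERDICT (by name: the statement is the Claim_ definition above) =====
theorem random_forest_vote_spec : Claim_equal_random_forest_vote := by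
  intro predictions _ hpre
  show random_forest_vote predictions = random_forest_vote_alt predictions
  exact main_eq predictions hpre.1
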